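-- pv_equiv track=rewrite | github.com/Bioinformatics7181/DeepLION2 | Codes/utils.py | check_tcr
-- ===== SOURCE A (Python) =====
-- def check_tcr(tcr):
--     # Check that a TCR sequence is valid.
--     aa_list = ["A", "R", "N", "D", "C", "E", "Q", "G", "H", "I",
--                "L", "K", "M", "F", "P", "S", "T", "W", "Y", "V"]
--     if len(tcr) > 24 or len(tcr) < 10:
--         return False
--     for aa in tcr:
--         if aa not in aa_list:
--             return False
--     if tcr[0].upper() != "C" or tcr[-1].upper() != "F":
--         return False
--     return True
-- ===== SOURCE B (Python) =====
-- import re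
--
-- # C, then 8-22 amino acids, then F: lengths 10-24 with the endpoint and alphabet
-- # checks folded into one automaton match.
-- _TCR_RE = re.compile(r"C[ACDEFGHIKLMNPQRSTVWY]{8,22}F")
--
-- def check_tcr(tcr):
--     return _TCR_RE.fullmatch(tcr) is not None
-- ===== Notes on version B (the rewrite author's own statement) =====
-- stated objective: idiomatic
-- what changed: Replaced the length guard, per-character membership loop and endpoint checks with a single compiled regex fullmatch C[ACDEFGHIKLMNPQRSTVWY]{8,22}F.
import Mathlib
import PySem

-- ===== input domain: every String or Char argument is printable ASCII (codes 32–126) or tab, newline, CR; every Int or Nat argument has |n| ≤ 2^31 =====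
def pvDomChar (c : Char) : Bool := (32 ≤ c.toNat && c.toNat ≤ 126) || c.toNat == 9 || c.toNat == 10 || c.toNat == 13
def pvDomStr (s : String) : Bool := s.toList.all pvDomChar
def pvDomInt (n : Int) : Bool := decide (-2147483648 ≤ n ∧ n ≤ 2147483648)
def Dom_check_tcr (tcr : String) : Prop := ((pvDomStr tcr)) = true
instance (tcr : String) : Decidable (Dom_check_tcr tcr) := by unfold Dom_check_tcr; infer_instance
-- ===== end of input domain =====

-- B replaces A's length guard, membership loop and endpoint checks by a single
-- regex-style full match "C[AA]{8,22}F"; proved to return the same Bool on every string.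


-- ===== PORT A =====
def aaList : List Char :=
  ['A','R','N','D','C','E','Q','G','H','I',
   'L','K','M','F','P','S','T','W','Y','V']

-- literal port of A: length guard, early-return membership loop, then endpoint checks
-- via Python indices 0 and -1 (the `none` branches are unreachable: length ≥ 10 there).
def check_tcr (tcr : String) : Bool :=
  let cs := tcr.toList
  if cs.length > 24 || cs.length < 10 then false
  else if cs.any (fun aa => !(aaList.contains aa)) then false
  else
    match PySem.List.pyGet? cs 0, PySem.List.pyGet? cs (-1) with
    | some a, some b => if !(a.toUpper == 'C') || !(b.toUpper == 'F') then false else true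
    | _, _ => false

-- ===== PORT B =====
-- the regex character class [ACDEFGHIKLMNPQRSTVWY]
def aaClass : List Char :=
  ['A','C','D','E','F','G','H','I','K','L','M','N','P','Q','R','S','T','V','W','Y']

-- port of B's fullmatch of C[aaClass]{8,22}F: leading 'C', trailing 'F',
-- 8–22 class characters in between.
def check_tcr_alt (tcr : String) : Bool :=
  match tcr.toList with
  | [] => false
  | c :: rest =>
      let mid := rest.dropLast
      c == 'C' && rest.getLast? == some 'F'
        && decide (8 ≤ mid.length) && decide (mid.length ≤ 22)
        && mid.all (fun a => aaClass.contains a)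

-- ===== PRECONDITION & SPEC =====
def Spec_check_tcr (tcr : String) (out : Bool) : Prop := out = check_tcr_alt tcr
instance (tcr : String) (out : Bool) : Decidable (Spec_check_tcr tcr out) := by unfold Spec_check_tcr; infer_instance

-- ===== CLAIM (what is proved, stated in full; the proofs are below) =====
def Claim_equal_check_tcr : Prop := ∀ (tcr : String), Dom_check_tcr tcr → Spec_check_tcr tcr (check_tcr tcr)

-- ===== LEMMAS AND PROOFS =====

-- chars of A's list are exactly the regex class, and are fixed by toUpper
lemma mem_aaList_toUpper {a : Char} (h : a ∈ aaList) : a.toUpper = a := by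
  fin_cases h <;> decide

lemma mem_aaList_iff_class (a : Char) : a ∈ aaList ↔ a ∈ aaClass := by
  constructor <;> intro h <;> fin_cases h <;> decide

lemma check_tcr_eq_alt (cs : List Char) :
    (if cs.length > 24 || cs.length < 10 then false
     else if cs.any (fun aa => !(aaList.contains aa)) then false
     else
       match PySem.List.pyGet? cs 0, PySem.List.pyGet? cs (-1) with
       | some a, some b => if !(a.toUpper == 'C') || !(b.toUpper == 'F') then false else true
       | _, _ => false) =
    (match cs with
     | [] => false
     | c :: rest =>
         let mid := rest.dropLast
         c == 'C' && rest.getLast? == some 'F'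
           && decide (8 ≤ mid.length) && decide (mid.length ≤ 22)
           && mid.all (fun a => aaClass.contains a)) := by
  match cs with
  | [] => decide
  | c :: rest =>
    by_cases hr : rest = []
    · subst hr; simp
    · obtain ⟨mid, b, hmb⟩ : ∃ mid b, rest = mid ++ [b] :=
        ⟨rest.dropLast, rest.getLast hr, (List.dropLast_append_getLast hr).symm⟩
      subst hmb
      rw [Bool.eq_iff_iff]
      have h0 : (0:Int) ≤ (mid.length : Int) + 1 := by positivity
      simp [PySem.List.pyGet?, PySem.List.pyIdx?, h0, Bool.or_eq_true, Bool.and_eq_true,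
            decide_eq_true_eq]
      constructor
      · rintro ⟨hlen, ⟨hcm, hmid, hbm⟩, hcf⟩
        rw [mem_aaList_toUpper hcm, mem_aaList_toUpper hbm] at hcf
        exact ⟨⟨⟨⟨hcf.1, hcf.2⟩, by omega⟩, by omega⟩,
               fun x hx => (mem_aaList_iff_class x).1 (hmid x hx)⟩
      · rintro ⟨⟨⟨⟨rfl, rfl⟩, h8⟩, h22⟩, hmid⟩
        exact ⟨⟨by omega, h8⟩,
               ⟨by decide, fun x hx => (mem_aaList_iff_class x).2 (hmid x hx), by decide⟩,
               by decide⟩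

-- ===== VERDICT (by name: the statement is the Claim_ definition above) =====
theorem check_tcr_spec : Claim_equal_check_tcr := by
  intro tcr _
  show check_tcr tcr = check_tcr_alt tcr
  unfold check_tcr check_tcr_alt
  exact check_tcr_eq_alt tcr.toList
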